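-- pv_equiv track=rewrite | github.com/MSebeke/Master | Benchmarking_And_Data/SProject6Rerework.py | LF
-- ===== SOURCE A (Python) =====
-- def LF(x,y,z):
--     dellist=[]
--     for entry in x:
--         if len(x[entry]) not in range(y,z):
--             dellist.append(entry)
--     for entry in dellist:
--         del x[entry]
--     return x
-- ===== SOURCE B (Python) =====
-- def LF(x, y, z):
--     # One-pass dict comprehension keeping the in-range entries (A mutates x
--     # in place and returns it; B builds a fresh dict -- return value only).
--     return {k: v for k, v in x.items() if y <= len(v) < z}
-- ===== Notes on version B (the rewrite author's own statement) =====
-- stated objective: simpler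
-- what changed: Replaces the two-phase delete-list-then-delete loop over the mutated dict with a single-pass dict comprehension keeping entries whose value length lies in [y, z); B builds a fresh dict instead of mutating x in place (return value identical), avoiding the second pass and per-key dict lookups/deletions.
import Mathlib
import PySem

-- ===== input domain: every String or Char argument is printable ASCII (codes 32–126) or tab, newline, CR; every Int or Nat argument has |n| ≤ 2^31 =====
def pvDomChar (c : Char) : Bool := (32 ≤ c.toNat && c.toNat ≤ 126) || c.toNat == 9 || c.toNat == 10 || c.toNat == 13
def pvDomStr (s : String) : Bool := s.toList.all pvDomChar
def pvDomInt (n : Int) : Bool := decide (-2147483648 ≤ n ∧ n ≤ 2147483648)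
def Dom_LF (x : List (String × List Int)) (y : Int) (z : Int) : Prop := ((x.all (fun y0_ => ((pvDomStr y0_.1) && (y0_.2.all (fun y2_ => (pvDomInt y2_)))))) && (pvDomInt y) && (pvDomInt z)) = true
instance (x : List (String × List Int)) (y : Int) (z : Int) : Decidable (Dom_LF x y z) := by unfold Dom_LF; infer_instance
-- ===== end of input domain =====

-- B replaces A's delete-list + second deletion loop with a one-pass filter (dict
-- comprehension); A mutates its argument in place and returns it, B builds a fresh
-- dict — the equivalence proved here is about the RETURN value only.


-- ===== PORT A =====
-- Port of A: build dellist over the dict's keys, then delete each listed key.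
-- 'len(v) not in range(y,z)' is ported as the exact arithmetic test ¬(y ≤ len ∧ len < z)
-- (Python range membership for ints), avoiding materialising the range.
def LF (x : List (String × List Int)) (y : Int) (z : Int) : List (String × List Int) :=
  let d := PySem.Dict.ofList x
  let dellist := d.keys.foldl (fun acc k =>
      if (!decide (y ≤ ((d.getD k []).length : Int) ∧ ((d.getD k []).length : Int) < z)) = true
      then acc ++ [k] else acc) []
  (dellist.foldl (fun d' k => d'.erase k) d).items

-- ===== PORT B =====
-- Port of B: one-pass filter (dict comprehension) keeping entries with y ≤ len(v) < z.
def LF_alt (x : List (String × List Int)) (y : Int) (z : Int) : List (String × List Int) :=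
  (PySem.Dict.ofList x).items.filter
    (fun p => decide (y ≤ (p.2.length : Int) ∧ (p.2.length : Int) < z))

-- ===== PRECONDITION & SPEC =====
def Spec_LF (x : List (String × List Int)) (y : Int) (z : Int) (out : List (String × List Int)) : Prop := out = LF_alt x y z
instance (x : List (String × List Int)) (y : Int) (z : Int) (out : List (String × List Int)) : Decidable (Spec_LF x y z out) := by unfold Spec_LF; infer_instance

-- ===== CLAIM (what is proved, stated in full; the proofs are below) =====
def Claim_equal_LF : Prop := ∀ (x : List (String × List Int)) (y : Int) (z : Int), Dom_LF x y z → Spec_LF x y z (LF x y z)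

-- ===== LEMMAS AND PROOFS =====

-- ===== VERDICT (by name: the statement is the Claim_ definition above) =====
lemma items_foldl_erase (L : List String) (d : PySem.Dict String (List Int)) :
    (L.foldl (fun d' k => d'.erase k) d).items
      = d.items.filter (fun p => !L.contains p.1) := by
  induction L generalizing d with
  | nil => simp
  | cons k L ih =>
      rw [List.foldl_cons, ih]
      simp only [PySem.Dict.erase, List.filter_filter]
      apply List.filter_congr
      intro p _
      simp [Bool.and_comm, beq_eq_decide]

lemma mem_filter_keys_getD (d : PySem.Dict String (List Int)) (q : List Int → Bool)
    (p : String × List Int) (hp : p ∈ d.items)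
    (hnd : d.keys.Nodup) :
    (d.keys.filter (fun k => q (d.getD k []))).contains p.1 = q p.2 := by
  have hk : p.1 ∈ d.keys := PySem.Dict.mem_keys_of_mem_items d hp
  have hg : d.getD p.1 [] = p.2 := by
    obtain ⟨a, b⟩ := p
    exact PySem.Dict.getD_of_mem_items d hp hnd []
  by_cases h : q p.2 = true
  · simp [List.contains_eq_mem, List.mem_filter, hk, hg, h]
  · simp only [Bool.not_eq_true] at h
    simp [List.contains_eq_mem, List.mem_filter, hg, h]

theorem LF_spec : Claim_equal_LF := by
  intro x y z _
  unfold Spec_LF LF LF_alt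
  dsimp only
  rw [PySem.List.foldl_append_if
        (fun k => !decide (y ≤ (((PySem.Dict.ofList x).getD k []).length : Int)
            ∧ (((PySem.Dict.ofList x).getD k []).length : Int) < z))
        (fun k => k)]
  rw [List.map_id', List.nil_append, items_foldl_erase]
  apply List.filter_congr
  intro p hp
  rw [mem_filter_keys_getD (PySem.Dict.ofList x)
        (fun v => !decide (y ≤ (v.length : Int) ∧ (v.length : Int) < z))
        p hp (PySem.Dict.nodup_keys_ofList x)]
  simp
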